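-- pv_equiv track=rewrite | github.com/sfmalloy/everybody-codes | events/2024/quest07/p2.py | check_plan
-- ===== SOURCE A (Python) =====
-- from itertools import cycle
--
-- def check_plan(plan: str, track):
--     it = cycle(plan)
--     tot = 0
--     val = 10
--     # for _ in range(len(track)*10):
--     for s, t in zip(it, track*10):
--         if t == '-':
--             s = -1
--         elif t == '+':
--             s = 1
--         val += s
--         tot += val
--     return tot
-- ===== SOURCE B (Python) =====
-- def check_plan(plan: str, track):
--     # Single pass over track: each char at index j repeats at j+k*len(track)
--     # for k in 0..9; its total weighted contribution is d*(10*(N-j) - 45*L).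
--     if not plan:
--         return 0
--     L = len(track)
--     N = L * 10
--     total = 10 * N
--     for j, c in enumerate(track):
--         d = 1 if c == '+' else -1
--         total += d * (10 * (N - j) - 45 * L)
--     return total
-- ===== Notes on version B (the rewrite author's own statement) =====
-- stated objective: faster
-- what changed: B replaces A's 10-lap simulation with two coupled running accumulators over track*10 by a single pass over track that adds each character's ten weighted contributions in closed form (d*(10*(N-j)-45*L)).
import Mathlib
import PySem

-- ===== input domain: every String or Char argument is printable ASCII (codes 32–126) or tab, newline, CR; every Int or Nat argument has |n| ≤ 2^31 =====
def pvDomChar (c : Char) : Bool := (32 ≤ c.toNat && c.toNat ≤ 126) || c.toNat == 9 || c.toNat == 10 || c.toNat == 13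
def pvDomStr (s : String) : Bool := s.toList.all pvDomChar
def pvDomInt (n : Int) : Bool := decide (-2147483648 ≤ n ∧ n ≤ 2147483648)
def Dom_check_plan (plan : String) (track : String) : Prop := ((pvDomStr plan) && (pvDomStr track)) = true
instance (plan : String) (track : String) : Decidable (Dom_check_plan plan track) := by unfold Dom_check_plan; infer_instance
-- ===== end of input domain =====

-- B replaces A's 10-lap two-accumulator simulation by a single weighted pass over track
-- (each track char's ten contributions summed in closed form); return value only.

-- ===== PORT A =====
-- step for one loop iteration: state (tot, val), t the current char of track*10.
-- Under Pre_ the char is '+' or '-'; on any other char Python raises TypeError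
-- (val += s with s a str), which is outside Pre_ — the 'else 0' arm is never reached there.
def pvStepA (st : Int × Int) (t : Char) : Int × Int :=
  let s : Int := if t = '-' then -1 else if t = '+' then 1 else 0
  (st.1 + st.2 + s, st.2 + s)

def check_plan (plan : String) (track : String) : Int :=
  -- zip(cycle(plan), track*10): empty when plan is "", else runs over all of track*10
  if plan.toList = [] then 0
  else (((List.replicate 10 track.toList).flatten).foldl pvStepA ((0 : Int), (10 : Int))).1

-- ===== PORT B =====
def pvStepB (L N : Int) (total : Int) (jc : Int × Char) : Int :=
  total + (if jc.2 = '+' then 1 else -1) * (10 * (N - jc.1) - 45 * L)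

def check_plan_alt (plan : String) (track : String) : Int :=
  if plan.toList = [] then 0
  else
    let L : Int := track.toList.length
    let N : Int := L * 10
    (PySem.List.enumerate track.toList 0).foldl (pvStepB L N) (10 * N)

-- ===== PRECONDITION & SPEC =====
-- Pre_ excludes inputs where A raises TypeError: a non-empty plan with some track
-- character other than '+'/'-' makes Python execute val += s on a str.
def Pre_check_plan (plan : String) (track : String) : Prop :=
  plan.toList = [] ∨ (track.toList.all (fun c => c == '+' || c == '-')) = true
instance (plan : String) (track : String) : Decidable (Pre_check_plan plan track) := by
  unfold Pre_check_plan; infer_instance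

def pvWitness_check_plan : String × String := ("+-+", "++--+-")

def Spec_check_plan (plan : String) (track : String) (out : Int) : Prop := out = check_plan_alt plan track
instance (plan : String) (track : String) (out : Int) : Decidable (Spec_check_plan plan track out) := by unfold Spec_check_plan; infer_instance

-- ===== CLAIM (what is proved, stated in full; the proofs are below) =====
def Claim_equal_check_plan : Prop := ∀ (plan : String) (track : String), Dom_check_plan plan track → Pre_check_plan plan track → Spec_check_plan plan track (check_plan plan track)
-- ===== LEMMAS AND PROOFS =====

-- delta of one track char (A's view; on '+'/'-' it equals B's ±1)
def pvD (t : Char) : Int := if t = '-' then -1 else if t = '+' then 1 else 0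
-- sum of deltas
def pvS : List Char → Int
  | [] => 0
  | t :: l => pvD t + pvS l
-- back-weighted sum: position j (from the front of l) gets weight l.length - j
def pvW : List Char → Int
  | [] => 0
  | t :: l => ((l.length : Int) + 1) * pvD t + pvW l
-- index-weighted sum starting at index k
def pvI : List Char → Int → Int
  | [], _ => 0
  | t :: l, k => pvD t * k + pvI l (k + 1)

theorem pvW_append (a b : List Char) :
    pvW (a ++ b) = pvW a + (b.length : Int) * pvS a + pvW b := by
  induction a with
  | nil => simp [pvW, pvS]
  | cons t a ih =>
    simp [pvW, pvS, ih, List.length_append]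
    ring

theorem pvFoldA (l : List Char) (tot val : Int) :
    l.foldl pvStepA (tot, val) = (tot + (l.length : Int) * val + pvW l, val + pvS l) := by
  induction l generalizing tot val with
  | nil => simp [pvW, pvS]
  | cons t l ih =>
    have hd : (if t = '-' then (-1 : Int) else if t = '+' then 1 else 0) = pvD t := rfl
    simp only [List.foldl_cons, pvStepA, ih, pvW, pvS, List.length_cons, hd, Prod.mk.injEq]
    constructor <;> (push_cast; ring)

theorem pvW_eq (l : List Char) (k : Int) :
    pvW l = (k + (l.length : Int)) * pvS l - pvI l k := by
  induction l generalizing k with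
  | nil => simp [pvW, pvS, pvI]
  | cons t l ih =>
    simp only [pvW, pvS, pvI, List.length_cons]
    rw [ih (k + 1)]
    push_cast
    ring

theorem pvFoldB (L N : Int) (l : List Char) (k total : Int)
    (H : ∀ c ∈ l, c = '+' ∨ c = '-') :
    (PySem.List.enumerate l k).foldl (pvStepB L N) total
      = total + (10 * N - 45 * L) * pvS l - 10 * pvI l k := by
  induction l generalizing k total with
  | nil => simp [PySem.List.enumerate_nil, pvS, pvI]
  | cons t l ih =>
    have ht : pvD t = (if t = '+' then 1 else -1) := by
      rcases H t (by simp) with h | h <;> simp [pvD, h]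
    simp only [PySem.List.enumerate_cons, List.foldl_cons, pvStepB]
    rw [ih _ _ (fun c hc => H c (by simp [hc]))]
    simp only [pvS, pvI, ← ht]
    ring

theorem pvW_rep10 (c : List Char) :
    pvW (List.replicate 10 c).flatten
      = 10 * pvW c + 45 * (c.length : Int) * pvS c := by
  have h : (List.replicate 10 c) = [c,c,c,c,c,c,c,c,c,c] := rfl
  simp only [h, List.flatten_cons, List.flatten_nil, pvW_append,
    List.length_append, List.length_nil, pvW]
  push_cast
  ring

theorem pvLen_rep10 (c : List Char) :
    (((List.replicate 10 c).flatten).length : Int) = 10 * (c.length : Int) := by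
  have h : (List.replicate 10 c) = [c,c,c,c,c,c,c,c,c,c] := rfl
  simp only [h, List.flatten_cons, List.flatten_nil, List.length_append, List.length_nil]
  push_cast
  ring

-- ===== VERDICT (by name: the statement is the Claim_ definition above) =====
theorem check_plan_spec : Claim_equal_check_plan := by
  intro plan track _ hpre
  unfold Spec_check_plan check_plan check_plan_alt
  by_cases hp : plan.toList = []
  · simp [hp]
  · rcases hpre with h | Hb
    · exact absurd h hp
    · have H : ∀ c ∈ track.toList, c = '+' ∨ c = '-' := by
        intro c hc
        have := List.all_eq_true.mp Hb c hc
        simpa using this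
      have hB := pvFoldB ((track.toList.length : Int)) ((track.toList.length : Int) * 10)
        track.toList 0 (10 * ((track.toList.length : Int) * 10)) H
      simp only [if_neg hp, pvFoldA, hB]
      rw [pvLen_rep10, pvW_rep10, pvW_eq track.toList 0]
      ring
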